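-- pv_equiv track=rewrite | github.com/AjinkyaPawale/Artificial-Intelligence | Maps/arrange_pichus.py | check
-- ===== SOURCE A (Python) =====
-- def check(board):
--     log = [] # It gets updated if the passed successor state is invalid
--     # The below logic checks if there is any row conflict along with the 'X' node taken into consideration
--     for rowno in range(0,len(board)):
--         flag = False
--         for colno in range(0,len(board[0])):
--             if board [rowno][colno] == 'p' and flag == True:
--                 log.append("Invalid")
--                 break
--             elif board[rowno][colno] == 'X':
--                 flag = False
--             elif board[rowno][colno] == '.':
--                 continue
--             elif board [rowno][colno] == 'p' and flag ==False:
--                 flag = True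
--     # The below logic checks if there is any column conflict along with the 'X' node taken into consideration
--     for colno in range(0,len(board[0])):
--         flag = False
--         for rowno in range(0,len(board)):
--             if board [rowno][colno] == 'p' and flag == True:
--                 log.append("Invalid")
--                 break
--             elif board[rowno][colno] == 'X':
--                 flag = False
--             elif board[rowno][colno] == '.':
--                 continue
--             elif board [rowno][colno] == 'p' and flag ==False:
--                 flag = True
--     # If any of the above conflict(i.e row/column) does not contain an invalid state then return True
--     if 'Invalid' not in log:
--         return True
-- ===== SOURCE B (Python) =====
-- def check(board):
--     width = len(board[0])
--     lines = [row[:width] for row in board]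
--     cols = [''.join(row[c] for row in lines) for c in range(width)]
--     if all(seg.count('p') <= 1 for line in lines + cols for seg in line.split('X')):
--         return True
-- ===== Notes on version B (the rewrite author's own statement) =====
-- stated objective: simpler
-- what changed: Replaces A's pair of nested flag state-machine loops with log accumulation by a split-on-'X' segment check (each row and column string is split on 'X'; a conflict is a segment with more than one 'p'), using C-level str.split/str.count instead of per-character Python loops.
-- outside the precondition, e.g. on check(['ppp', 'ppp', 'pp']): A returns None, B raises IndexError
import Mathlib
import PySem

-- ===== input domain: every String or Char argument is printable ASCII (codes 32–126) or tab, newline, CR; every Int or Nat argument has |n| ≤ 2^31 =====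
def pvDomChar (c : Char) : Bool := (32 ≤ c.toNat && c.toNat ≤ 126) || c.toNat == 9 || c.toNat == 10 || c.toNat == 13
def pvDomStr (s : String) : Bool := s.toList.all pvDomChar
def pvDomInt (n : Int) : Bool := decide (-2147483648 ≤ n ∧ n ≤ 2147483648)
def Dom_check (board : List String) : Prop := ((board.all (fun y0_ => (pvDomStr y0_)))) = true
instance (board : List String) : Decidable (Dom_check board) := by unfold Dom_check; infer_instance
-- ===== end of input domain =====

-- ===== PORT A =====
-- B changes: split-on-'X' segment counting instead of A's flag state machine; objective: simpler.
-- A's inner loop (break on second 'p' since last 'X'); log grows by "Invalid" on a conflict.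
def innerA : List Char → Bool → List String → List String
  | [], _, log => log
  | c :: rest, flag, log =>
    if c == 'p' && flag then log ++ ["Invalid"]
    else if c == 'X' then innerA rest false log
    else if c == '.' then innerA rest flag log
    else if c == 'p' && !flag then innerA rest true log
    else innerA rest flag log

def check (board : List String) : Option Bool :=
  let width := (board.headD "").length
  -- row pass: board[rowno][colno] for colno in range(len(board[0])) — the first `width` chars of the row
  let log1 := board.foldl (fun log row => innerA (row.toList.take width) false log) []
  -- column pass: for each colno, the chars board[rowno][colno]
  let log2 := (List.range width).foldl
      (fun log c => innerA (board.map (fun row => row.toList.getD c ' ')) false log) log1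
  if "Invalid" ∈ log2 then none else some true

-- ===== PORT B =====
-- str.split('X') for a one-character separator, ported by hand (exact)
def splitX : List Char → List (List Char)
  | [] => [[]]
  | c :: r =>
    let s := splitX r
    if c == 'X' then [] :: s else (c :: s.headI) :: s.tail

def lineOk (l : List Char) : Bool := (splitX l).all (fun s => s.count 'p' ≤ 1)

def check_alt (board : List String) : Option Bool :=
  let width := (board.headD "").length
  let lines := board.map (fun row => row.toList.take width)   -- row[:width]
  let cols := (List.range width).map (fun c => lines.map (fun l => l.getD c ' '))
  if (lines ++ cols).all lineOk then some true else none

-- ===== PRECONDITION & SPEC =====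
-- Pre_ excludes the empty board and ragged boards with a row shorter than the first row: there A's
-- indexing generally raises IndexError (only on rare all-conflicting ragged boards do A's breaks
-- preempt the bad index and A returns None, while B's eager column build still raises).
def Pre_check (board : List String) : Prop :=
  board ≠ [] ∧ ∀ row ∈ board, (board.headD "").length ≤ row.length
instance (board : List String) : Decidable (Pre_check board) := by unfold Pre_check; infer_instance
def pvWitness_check : List String := ["p.X", "X.p", "..p"]
def Spec_check (board : List String) (out : Option Bool) : Prop := out = check_alt board
instance (board : List String) (out : Option Bool) : Decidable (Spec_check board out) := by unfold Spec_check; infer_instance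

-- ===== CLAIM (what is proved, stated in full; the proofs are below) =====
def Claim_equal_check : Prop := ∀ (board : List String), Dom_check board → Pre_check board → Spec_check board (check board)

-- ===== LEMMAS AND PROOFS =====

-- A's inner loop as a pure conflict predicate
def badA : Bool → List Char → Bool
  | _, [] => false
  | flag, c :: rest =>
    if c == 'p' && flag then true
    else if c == 'X' then badA false rest
    else if c == '.' then badA flag rest
    else if c == 'p' && !flag then badA true rest
    else badA flag rest

theorem innerA_eq (l : List Char) (flag : Bool) (log : List String) :
    innerA l flag log = log ++ (if badA flag l then ["Invalid"] else []) := by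
  induction l generalizing flag with
  | nil => simp [innerA, badA]
  | cons c rest ih =>
    simp only [innerA, badA]
    split_ifs <;> cases flag <;> simp_all

theorem splitX_ne_nil (l : List Char) : splitX l ≠ [] := by
  cases l with
  | nil => simp [splitX]
  | cons c r => simp only [splitX]; split_ifs <;> simp

theorem badA_eq (l : List Char) (flag : Bool) :
    badA flag l =
      ((flag && decide (1 ≤ (splitX l).headI.count 'p')) ||
        (splitX l).any (fun s => decide (2 ≤ s.count 'p'))) := by
  induction l generalizing flag with
  | nil => simp [badA, splitX]
  | cons c r ih =>
    rcases hsp : splitX r with _ | ⟨s0, ss⟩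
    · exact absurd hsp (splitX_ne_nil r)
    · by_cases hX : c = 'X'
      · subst hX
        simp only [hsp] at ih
        simp [badA, splitX, hsp, ih]
      · by_cases hp : c = 'p'
        · subst hp
          simp only [hsp] at ih
          cases flag with
          | true =>
            have h1 : (1:Nat) ≤ s0.count 'p' + 1 := by omega
            simp [badA, splitX, hsp, h1]
          | false =>
            have hL : badA false ('p' :: r) = badA true r := by simp [badA]
            have hR : splitX ('p' :: r) = ('p' :: s0) :: ss := by simp [splitX, hsp]
            rw [hL, ih, hR]
            simp only [List.headI_cons, List.any_cons, List.count_cons, Bool.true_and,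
              Bool.false_and, Bool.false_or]
            have h3 : (decide ((2:Nat) ≤ s0.count 'p' + 1)) = decide (1 ≤ s0.count 'p') := by
              rw [decide_eq_decide]; omega
            by_cases h1 : 1 ≤ s0.count 'p'
            · simp [h1]
            · simp [h1, show ¬ ((2:Nat) ≤ s0.count 'p') by omega]
        · simp only [hsp] at ih
          simp [badA, splitX, hsp, ih, hp, hX]

theorem any_two_eq_not_all (ls : List (List Char)) :
    (ls.any fun s => decide (2 ≤ s.count 'p')) = !(ls.all fun s => s.count 'p' ≤ 1) := by
  induction ls with
  | nil => simp
  | cons s t ih =>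
    simp only [List.any_cons, List.all_cons, Bool.not_and, ih]
    congr 1
    rw [← decide_not, decide_eq_decide]
    omega

theorem badA_false_eq (l : List Char) : badA false l = !lineOk l := by
  rw [badA_eq]
  simp only [Bool.false_and, Bool.false_or, lineOk]
  exact any_two_eq_not_all _

theorem fold_innerA (lines : List (List Char)) (log : List String) :
    lines.foldl (fun log l => innerA l false log) log =
      log ++ lines.flatMap (fun l => if badA false l then ["Invalid"] else []) := by
  induction lines generalizing log with
  | nil => simp
  | cons l rest ih => simp [List.foldl_cons, innerA_eq, List.flatMap_def]

theorem mem_invalid_iff (lines : List (List Char)) :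
    ("Invalid" ∈ lines.flatMap (fun l => if badA false l then ["Invalid"] else [])) ↔
      ¬ lines.all lineOk := by
  simp only [List.mem_flatMap, List.all_eq_true, not_forall]
  constructor
  · rintro ⟨l, hl, hmem⟩
    have hb : badA false l = true := by
      rcases h : badA false l
      · rw [h] at hmem; simp at hmem
      · rfl
    rw [badA_false_eq] at hb
    exact ⟨l, hl, by simp_all⟩
  · rintro ⟨l, hl, hbad⟩
    have hb : badA false l = true := by
      rw [badA_false_eq]; simp_all
    exact ⟨l, hl, by simp [hb]⟩

theorem getD_take (l : List Char) (n c : Nat) (h : c < n) :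
    (l.take n).getD c ' ' = l.getD c ' ' := by
  simp only [List.getD_eq_getElem?_getD, List.getElem?_take_of_lt h]

theorem check_spec : Claim_equal_check := by
  intro board _ _
  unfold Spec_check check check_alt
  simp only []
  set width := (board.headD "").length with hw
  set lines := board.map (fun row => row.toList.take width) with hlines
  have hcols : (List.range width).map (fun c => lines.map (fun l => l.getD c ' '))
      = (List.range width).map (fun c => board.map (fun row => row.toList.getD c ' ')) := by
    apply List.map_congr_left
    intro c hc
    rw [List.mem_range] at hc
    rw [hlines, List.map_map]
    apply List.map_congr_left
    intro row _
    exact getD_take _ _ _ hc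
  have hfold2 : ∀ (log : List String),
      (List.range width).foldl
        (fun log c => innerA (board.map (fun row => row.toList.getD c ' ')) false log) log
      = ((List.range width).map (fun c => board.map (fun row => row.toList.getD c ' '))).foldl
        (fun log l => innerA l false log) log := by
    intro log; rw [List.foldl_map]
  have hfold1 : board.foldl (fun log row => innerA (row.toList.take width) false log)
        ([] : List String)
      = lines.foldl (fun log l => innerA l false log) [] := by
    rw [hlines, List.foldl_map]
  rw [hfold2, hfold1, fold_innerA, fold_innerA, ← hcols]
  rw [List.nil_append, ← List.flatMap_append]
  by_cases h : (lines ++ (List.range width).map (fun c => lines.map (fun l => l.getD c ' '))).all lineOk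
  · rw [if_pos h, if_neg]
    rw [mem_invalid_iff]
    simpa using h
  · rw [if_neg h, if_pos]
    rw [mem_invalid_iff]
    simpa using h
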